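-- pv_equiv track=rewrite | github.com/TakumiOtagaki/LinearCapR_ComputationalExperiments | scripts/common/rna_structure_parser.py | _extract_pairs_from_dotbracket
-- ===== SOURCE A (Python) =====
-- from typing import List, Tuple, Dict, Optional, Union
--
-- def _extract_pairs_from_dotbracket(structure: str) -> List[Tuple[int, int]]:
--     """dot-bracket記法から塩基対リストを抽出（1-indexedで返す）"""
--     stack = []
--     pairs = []
--
--     for i, char in enumerate(structure):
--         if char == '(':
--             stack.append(i + 1)  # 1-indexedに変換
--         elif char == ')':
--             if stack:
--                 j = stack.pop()
--                 pairs.append((j, i + 1))  # (開く位置, 閉じる位置)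
--
--     # i < j の順序でソート
--     pairs.sort()
--     return pairs
-- ===== SOURCE B (Python) =====
-- from typing import List, Tuple
--
-- def _extract_pairs_from_dotbracket(structure: str) -> List[Tuple[int, int]]:
--     """Pairs are recorded in an array indexed by opening position, so the
--     result comes out already ordered without a final sort."""
--     n = len(structure)
--     close_at = [0] * n          # close_at[j] = 1-indexed closing position for '(' at index j (0 = unmatched)
--     stack = []
--     for i, ch in enumerate(structure):
--         if ch == '(':
--             stack.append(i)
--         elif ch == ')' and stack:
--             close_at[stack.pop()] = i + 1
--     return [(j + 1, close_at[j]) for j in range(n) if close_at[j]]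
-- ===== Notes on version B (the rewrite author's own statement) =====
-- stated objective: alternative
-- what changed: B drops the final sort: it records each pair's closing position in an array indexed by the opening position and reads the pairs out in increasing opening position, which is already the sorted order since opening positions are distinct; it avoids the O(n log n) sort but its pure-Python loop is not measurably faster.
import Mathlib
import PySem

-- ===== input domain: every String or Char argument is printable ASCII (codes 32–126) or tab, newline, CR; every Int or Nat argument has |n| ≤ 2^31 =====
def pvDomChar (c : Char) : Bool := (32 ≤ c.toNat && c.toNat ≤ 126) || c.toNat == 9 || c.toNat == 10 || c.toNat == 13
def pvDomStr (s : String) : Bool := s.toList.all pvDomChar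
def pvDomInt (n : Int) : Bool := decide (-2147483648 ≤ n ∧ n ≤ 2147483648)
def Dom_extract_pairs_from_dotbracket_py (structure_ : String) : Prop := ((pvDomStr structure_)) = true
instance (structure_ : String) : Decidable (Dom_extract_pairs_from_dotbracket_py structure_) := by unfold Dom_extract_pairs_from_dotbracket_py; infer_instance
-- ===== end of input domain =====

-- B avoids A's final sort: it stores each closing position in an array indexed by the
-- opening position and reads the pairs out in increasing opening position (already sorted).

-- ===== PORT A =====
-- the 'for i, char in enumerate(structure)' loop of A: state = (stack, pairs);
-- stack.append = ++ [·], stack.pop = getLast?/dropLast (end of the list, as in Python)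
def pvALoop (cs : List Char) (i : Int) (stack : List Int) (pairs : List (Int × Int)) :
    List Int × List (Int × Int) :=
  match cs with
  | [] => (stack, pairs)
  | c :: rest =>
    if c = '(' then pvALoop rest (i + 1) (stack ++ [i + 1]) pairs
    else if c = ')' then
      match stack.getLast? with
      | some j => pvALoop rest (i + 1) stack.dropLast (pairs ++ [(j, i + 1)])
      | none => pvALoop rest (i + 1) stack pairs
    else pvALoop rest (i + 1) stack pairs

def extract_pairs_from_dotbracket_py (structure_ : String) : List (Int × Int) :=
  PySem.List.sorted2 (pvALoop structure_.toList 0 [] []).2 (fun p => p.1) (fun p => p.2)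

-- ===== PORT B =====
-- Source B's loop: state = (stack of 0-indexed opening positions, close_at array);
-- close_at[stack.pop()] = i+1 becomes List.set (popped indices are Nat, always < close.length)
def pvAltLoop (cs : List Char) (i : Nat) (stack : List Nat) (close : List Int) : List Int :=
  match cs with
  | [] => close
  | c :: rest =>
    if c = '(' then pvAltLoop rest (i + 1) (i :: stack) close
    else if c = ')' then
      match stack with
      | j :: s' => pvAltLoop rest (i + 1) s' (close.set j ((i : Int) + 1))
      | [] => pvAltLoop rest (i + 1) [] close
    else pvAltLoop rest (i + 1) stack close

-- Source B's final comprehension: [(j+1, close_at[j]) for j in range(n) if close_at[j]]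
def extract_pairs_from_dotbracket_py_alt (structure_ : String) : List (Int × Int) :=
  let cs := structure_.toList
  let close := pvAltLoop cs 0 [] (List.replicate cs.length 0)
  (List.range cs.length).filterMap (fun j =>
    if close.getD j 0 ≠ 0 then some (((j : Int) + 1, close.getD j 0)) else none)

-- ===== PRECONDITION & SPEC =====
def Spec_extract_pairs_from_dotbracket_py (structure_ : String) (out : List (Int × Int)) : Prop := out = extract_pairs_from_dotbracket_py_alt structure_
instance (structure_ : String) (out : List (Int × Int)) : Decidable (Spec_extract_pairs_from_dotbracket_py structure_ out) := by unfold Spec_extract_pairs_from_dotbracket_py; infer_instance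

-- ===== CLAIM (what is proved, stated in full; the proofs are below) =====
def Claim_equal_extract_pairs_from_dotbracket_py : Prop := ∀ (structure_ : String), Dom_extract_pairs_from_dotbracket_py structure_ → Spec_extract_pairs_from_dotbracket_py structure_ (extract_pairs_from_dotbracket_py structure_)

-- ===== LEMMAS AND PROOFS =====

-- insertBy with two predicates agreeing on the inserted element vs the list's members
theorem pv_insertBy_congr {α : Type} (p q : α → α → Bool) (x : α) (l : List α)
    (h : ∀ y ∈ l, p x y = q x y) :
    PySem.List.insertBy p x l = PySem.List.insertBy q x l := by
  induction l with
  | nil => rfl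
  | cons y ys ih =>
    simp only [PySem.List.insertBy]
    rw [h y (by simp)]
    by_cases hq : q x y = true
    · simp [hq]
    · simp only [Bool.not_eq_true] at hq
      simp [hq, ih (fun z hz => h z (by simp [hz]))]

-- on a list whose k1-keys are pairwise distinct, the tuple-key sort is the k1 sort
theorem pv_sorted2_eq_sorted {α : Type} (xs : List α) (k1 : α → Int) (k2 : α → Int)
    (hne : xs.Pairwise (fun a b => k1 a ≠ k1 b)) :
    PySem.List.sorted2 xs k1 k2 = PySem.List.sorted xs k1 := by
  show xs.foldl (fun acc x => PySem.List.insertBy _ x acc) [] =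
       xs.foldl (fun acc x => PySem.List.insertBy _ x acc) []
  have main : ∀ (l : List α) (acc : List α),
      l.Pairwise (fun a b => k1 a ≠ k1 b) →
      (∀ a ∈ acc, ∀ b ∈ l, k1 a ≠ k1 b) →
      l.foldl (fun acc x => PySem.List.insertBy
          (fun a b => decide (k1 a < k1 b) || !decide (k1 b < k1 a) && decide (k2 a < k2 b)) x acc) acc =
      l.foldl (fun acc x => PySem.List.insertBy (fun a b => decide (k1 a < k1 b)) x acc) acc := by
    intro l
    induction l with
    | nil => intro acc _ _; rfl
    | cons x t ih =>
      intro acc hpw hacc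
      simp only [List.foldl_cons]
      have hstep : PySem.List.insertBy
          (fun a b => decide (k1 a < k1 b) || !decide (k1 b < k1 a) && decide (k2 a < k2 b)) x acc =
          PySem.List.insertBy (fun a b => decide (k1 a < k1 b)) x acc := by
        apply pv_insertBy_congr
        intro y hy
        have hxy : k1 x ≠ k1 y := fun h => hacc y hy x (by simp) h.symm
        by_cases hlt : k1 x < k1 y
        · simp [hlt]
        · have : k1 y < k1 x := lt_of_le_of_ne (not_lt.mp hlt) hxy.symm
          simp [hlt, this]
      rw [hstep]
      refine ih _ (List.pairwise_cons.mp hpw).2 ?_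
      intro a ha b hb
      rcases (PySem.List.mem_insertBy (before := fun a b => decide (k1 a < k1 b))
        (x := x) (ys := acc) (y := a)).mp ha with rfl | ha'
      · exact (List.pairwise_cons.mp hpw).1 b hb
      · exact hacc a ha' b (by simp [hb])
  exact main xs [] hne (by intro a ha; simp at ha)

-- name the result of sorted2 directly: any strictly k1-increasing rearrangement
theorem pv_sorted2_eq_of_perm_of_pairwise_lt {α : Type} (xs ys : List α)
    (k1 k2 : α → Int) (hperm : ys.Perm xs)
    (hlt : ys.Pairwise (fun a b => k1 a < k1 b)) :
    PySem.List.sorted2 xs k1 k2 = ys := by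
  have hne : xs.Pairwise (fun a b => k1 a ≠ k1 b) := by
    have h1 : ys.Pairwise (fun a b => k1 a ≠ k1 b) := hlt.imp (fun h => ne_of_lt h)
    exact (List.Perm.pairwise_iff (fun {a b} h => h.symm) hperm).mp h1
  rw [pv_sorted2_eq_sorted xs k1 k2 hne]
  exact PySem.List.sorted_eq_of_perm_of_pairwise_lt xs ys k1 hperm hlt

-- the joint loop invariant: A's (stack, pairs) vs B's (stack, close) after the same prefix
theorem pv_main : ∀ (rest : List Char) (i : Nat) (stB : List Nat) (close : List Int)
    (pairs : List (Int × Int)),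
    i + rest.length = close.length →
    stB.Pairwise (fun a b => b < a) →
    (∀ j ∈ stB, j < i ∧ close.getD j 0 = 0) →
    (∀ j, i ≤ j → close.getD j 0 = 0) →
    (∀ p, p ∈ pairs ↔ ∃ j, j < close.length ∧ close.getD j 0 ≠ 0 ∧
        p = (((j : Int) + 1, close.getD j 0) : Int × Int)) →
    pairs.Pairwise (fun p q => p.1 ≠ q.1) →
    (pvAltLoop rest i stB close).length = close.length ∧
    (∀ p, p ∈ (pvALoop rest (i : Int) ((List.map (fun j : Nat => (j : Int) + 1) stB).reverse) pairs).2 ↔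
      ∃ j, j < close.length ∧ (pvAltLoop rest i stB close).getD j 0 ≠ 0 ∧
        p = (((j : Int) + 1, (pvAltLoop rest i stB close).getD j 0) : Int × Int)) ∧
    (pvALoop rest (i : Int) ((List.map (fun j : Nat => (j : Int) + 1) stB).reverse) pairs).2.Pairwise
      (fun p q => p.1 ≠ q.1) := by
  intro rest
  induction rest with
  | nil =>
    intro i stB close pairs hlen hdec hstk hzero hmem hpw
    exact ⟨rfl, hmem, hpw⟩
  | cons c rest ih =>
    intro i stB close pairs hlen hdec hstk hzero hmem hpw
    by_cases hc : c = '('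
    · -- push
      simp only [pvALoop, pvAltLoop, if_pos hc]
      have H := ih (i + 1) (i :: stB) close pairs
        (by simp at hlen ⊢; omega)
        (List.pairwise_cons.mpr ⟨fun b hb => (hstk b hb).1, hdec⟩)
        (by
          intro j hj
          rcases List.mem_cons.mp hj with rfl | hj'
          · exact ⟨Nat.lt_succ_self _, hzero j (le_refl _)⟩
          · exact ⟨Nat.lt_succ_of_lt (hstk j hj').1, (hstk j hj').2⟩)
        (fun j hj => hzero j (by omega)) hmem hpw
      simpa [List.map_cons, Nat.cast_add, Nat.cast_one] using H
    · by_cases hc' : c = ')'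
      · match stB, hdec, hstk with
        | [], _, _ =>
          simp only [pvALoop, pvAltLoop, if_neg hc, if_pos hc']
          have H := ih (i + 1) [] close pairs (by simp at hlen ⊢; omega)
            (by simp) (by simp) (fun j hj => hzero j (by omega)) hmem hpw
          simpa [Nat.cast_add, Nat.cast_one] using H
        | j :: s', hdec, hstk =>
          have hji : j < i := (hstk j (by simp)).1
          have hj0 : close.getD j 0 = 0 := (hstk j (by simp)).2
          have hjlen : j < close.length := by simp at hlen; omega
          have hset_self : (close.set j ((i : Int) + 1)).getD j 0 = (i : Int) + 1 := by
            rw [List.getD_eq_getElem?_getD, List.getElem?_set_self hjlen]; rfl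
          have hset_ne : ∀ k, k ≠ j →
              (close.set j ((i : Int) + 1)).getD k 0 = close.getD k 0 := by
            intro k hk
            rw [List.getD_eq_getElem?_getD, List.getElem?_set_ne (fun h => hk h.symm),
              ← List.getD_eq_getElem?_getD]
          simp only [pvALoop, pvAltLoop, if_neg hc, if_pos hc']
          have H := ih (i + 1) s' (close.set j ((i : Int) + 1))
            (pairs ++ [(((j : Int) + 1, (i : Int) + 1) : Int × Int)])
            (by simp at hlen ⊢; omega)
            (List.pairwise_cons.mp hdec).2
            (by
              intro k hk
              have hkj : k < j := (List.pairwise_cons.mp hdec).1 k hk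
              refine ⟨Nat.lt_succ_of_lt (hstk k (by simp [hk])).1, ?_⟩
              rw [hset_ne k (Nat.ne_of_lt hkj)]
              exact (hstk k (by simp [hk])).2)
            (by
              intro k hk
              rw [hset_ne k (by omega)]
              exact hzero k (by omega))
            (by
              intro p
              simp only [List.mem_append, List.mem_singleton, List.length_set]
              constructor
              · rintro (hp | rfl)
                · rcases (hmem p).mp hp with ⟨k, hk, hk0, rfl⟩
                  have hkj : k ≠ j := fun h => hk0 (h ▸ hj0)
                  exact ⟨k, hk, by rw [hset_ne k hkj]; exact ⟨hk0, rfl⟩⟩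
                · exact ⟨j, hjlen, by rw [hset_self]; exact ⟨by omega, rfl⟩⟩
              · rintro ⟨k, hk, hk0, rfl⟩
                by_cases hkj : k = j
                · subst hkj
                  right; rw [hset_self]
                · left
                  rw [hset_ne k hkj] at hk0 ⊢
                  exact (hmem _).mpr ⟨k, hk, hk0, rfl⟩)
            (by
              rw [List.pairwise_append]
              refine ⟨hpw, List.pairwise_singleton _ _, ?_⟩
              intro p hp q hq
              rcases (hmem p).mp hp with ⟨k, hk, hk0, rfl⟩
              have hkj : k ≠ j := fun h => hk0 (h ▸ hj0)
              simp only [List.mem_singleton] at hq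
              subst hq
              simp only []
              intro h
              exact hkj (by exact_mod_cast (by omega : (k : Int) = j))
              )
          simp only [List.length_set] at H
          simpa [Nat.cast_add, Nat.cast_one] using H
      · -- other character
        simp only [pvALoop, pvAltLoop, if_neg hc, if_neg hc']
        have H := ih (i + 1) stB close pairs (by simp at hlen ⊢; omega) hdec
          (fun j hj => ⟨Nat.lt_succ_of_lt (hstk j hj).1, (hstk j hj).2⟩)
          (fun j hj => hzero j (by omega)) hmem hpw
        simpa [Nat.cast_add, Nat.cast_one] using H

theorem pv_getD_replicate (n j : Nat) : (List.replicate n (0 : Int)).getD j 0 = 0 := by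
  rcases Nat.lt_or_ge j n with h | h
  · exact List.getD_replicate 0 h
  · rw [List.getD_eq_getElem?_getD, List.getElem?_replicate, if_neg (by omega)]; rfl

-- ===== VERDICT (by name: the statement is the Claim_ definition above) =====
theorem extract_pairs_from_dotbracket_py_spec : Claim_equal_extract_pairs_from_dotbracket_py := by
  intro s _
  show extract_pairs_from_dotbracket_py s = extract_pairs_from_dotbracket_py_alt s
  have H := pv_main s.toList 0 [] (List.replicate s.toList.length 0) []
    (by simp) (by simp) (by simp)
    (fun j _ => pv_getD_replicate _ j)
    (by intro p; simp)
    (by simp)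
  simp only [List.length_replicate, List.map_nil, List.reverse_nil, Nat.cast_zero] at H
  set n := s.toList.length with hn
  set C := pvAltLoop s.toList 0 [] (List.replicate n 0) with hC
  set P := (pvALoop s.toList 0 [] []).2 with hP
  set R := (List.range n).filterMap (fun j =>
    if C.getD j 0 ≠ 0 then some (((j : Int) + 1, C.getD j 0)) else none) with hR
  have hmemR : ∀ p, p ∈ R ↔ ∃ j, j < n ∧ C.getD j 0 ≠ 0 ∧
      p = (((j : Int) + 1, C.getD j 0) : Int × Int) := by
    intro p
    rw [hR, List.mem_filterMap]
    constructor
    · rintro ⟨j, hj, hfj⟩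
      rw [List.mem_range] at hj
      by_cases h0 : C.getD j 0 ≠ 0
      · rw [if_pos h0] at hfj
        exact ⟨j, hj, h0, (Option.some.inj hfj).symm⟩
      · rw [if_neg h0] at hfj; exact absurd hfj (by simp)
    · rintro ⟨j, hj, h0, rfl⟩
      exact ⟨j, List.mem_range.mpr hj, by rw [if_pos h0]⟩
  have hltR : R.Pairwise (fun p q => p.1 < q.1) := by
    rw [hR, List.pairwise_filterMap]
    refine List.pairwise_lt_range.imp ?_
    intro a b hab p hp q hq
    by_cases ha : C.getD a 0 ≠ 0
    · by_cases hb : C.getD b 0 ≠ 0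
      · rw [if_pos ha] at hp; rw [if_pos hb] at hq
        rw [← Option.some.inj hp, ← Option.some.inj hq]
        dsimp only
        omega
      · rw [if_neg hb] at hq; exact absurd hq (by simp)
    · rw [if_neg ha] at hp; exact absurd hp (by simp)
  have hndR : R.Nodup := hltR.imp (fun {p q} h e => absurd (congrArg Prod.fst e) (ne_of_lt h))
  have hndP : P.Nodup := H.2.2.imp (fun {p q} h e => absurd (congrArg Prod.fst e) h)
  have hperm : R.Perm P := by
    rw [List.perm_ext_iff_of_nodup hndR hndP]
    intro p
    rw [hmemR p, H.2.1 p]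
  exact pv_sorted2_eq_of_perm_of_pairwise_lt P R (fun p => p.1) (fun p => p.2) hperm hltR
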